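-- pv_equiv track=rewrite | github.com/kebonly/studley | studley/cordex.py | get_codex_sequence
-- ===== SOURCE A (Python) =====
-- def get_codex_sequence(input_seq):
--
--     first_half = input_seq[:len(input_seq)//2]
--     second_half = input_seq[len(input_seq)//2:]
--     second_half.reverse()
--     res = []
--
--     for i in range(len(input_seq)//4):
--         res.append(second_half.pop(0))
--         res.append(first_half.pop(0))
--         res.append(first_half.pop(0))
--         res.append(second_half.pop(0))
--
--     return res
-- ===== SOURCE B (Python) =====
-- def get_codex_sequence(input_seq):
--     n = len(input_seq)
--     return [input_seq[j]
--             for i in range(n // 4)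
--             for j in (n - 1 - 2 * i, 2 * i, 2 * i + 1, n - 2 - 2 * i)]
-- ===== Notes on version B (the rewrite author's own statement) =====
-- stated objective: faster
-- what changed: B computes each output quartet by direct index arithmetic into the input (a flat comprehension over range(n//4)) instead of A's slicing into two half-lists, reversing one, and destructively popping from the front of both; this removes the O(n) shift each pop(0) performs.
import Mathlib
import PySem

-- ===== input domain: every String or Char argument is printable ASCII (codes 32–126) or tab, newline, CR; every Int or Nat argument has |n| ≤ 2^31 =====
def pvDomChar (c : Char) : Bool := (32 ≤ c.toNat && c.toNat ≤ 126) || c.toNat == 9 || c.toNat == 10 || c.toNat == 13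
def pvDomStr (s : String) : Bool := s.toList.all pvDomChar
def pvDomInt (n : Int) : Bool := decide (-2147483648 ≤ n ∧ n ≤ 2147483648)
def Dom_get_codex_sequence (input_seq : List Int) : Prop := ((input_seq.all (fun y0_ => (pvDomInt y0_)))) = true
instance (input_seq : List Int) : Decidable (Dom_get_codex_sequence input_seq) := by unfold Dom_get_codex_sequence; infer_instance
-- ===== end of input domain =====

-- B replaces A's slice/reverse/pop-consumption of two half-lists by direct index arithmetic into the input (objective: simpler).

-- ===== PORT A =====
-- A's loop body (the four pop/append statements), kept as a named helper.
-- pop(0): Python raises IndexError on an empty list; that never happens in A's loop (the loop runs len//4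
-- times, which exhausts neither half — established by the equivalence proof), so `.getD (0, [])` is never used.
def pvStepA (st : List Int × List Int × List Int) (_i : Int) : List Int × List Int × List Int :=
  let (fh, sh, res) := st
  let (a, sh) := (PySem.List.pop? sh 0).getD (0, [])
  let res := res ++ [a]
  let (b, fh) := (PySem.List.pop? fh 0).getD (0, [])
  let res := res ++ [b]
  let (c, fh) := (PySem.List.pop? fh 0).getD (0, [])
  let res := res ++ [c]
  let (d, sh) := (PySem.List.pop? sh 0).getD (0, [])
  let res := res ++ [d]
  (fh, sh, res)

def get_codex_sequence (input_seq : List Int) : List Int :=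
  let first_half := PySem.List.slice input_seq none (some (PySem.Int.floordiv (input_seq.length : Int) 2))
  let second_half := PySem.List.slice input_seq (some (PySem.Int.floordiv (input_seq.length : Int) 2)) none
  let second_half := second_half.reverse
  let res : List Int := []
  let st :=
    (PySem.List.pyRange 0 (PySem.Int.floordiv (input_seq.length : Int) 4)).foldl pvStepA
      (first_half, second_half, res)
  st.2.2

-- ===== PORT B =====
-- input_seq[j]: every index j used below is in range (established by the equivalence proof), so `.getD 0` is never used.
def get_codex_sequence_alt (input_seq : List Int) : List Int :=
  let n : Int := input_seq.length
  (PySem.List.pyRange 0 (PySem.Int.floordiv n 4)).flatMap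
    (fun i => [n - 1 - 2 * i, 2 * i, 2 * i + 1, n - 2 - 2 * i].map
      (fun j => (PySem.List.pyGet? input_seq j).getD 0))

-- ===== PRECONDITION & SPEC =====
def Spec_get_codex_sequence (input_seq : List Int) (out : List Int) : Prop := out = get_codex_sequence_alt input_seq
instance (input_seq : List Int) (out : List Int) : Decidable (Spec_get_codex_sequence input_seq out) := by unfold Spec_get_codex_sequence; infer_instance

-- ===== CLAIM (what is proved, stated in full; the proofs are below) =====
def Claim_equal_get_codex_sequence : Prop := ∀ (input_seq : List Int), Dom_get_codex_sequence input_seq → Spec_get_codex_sequence input_seq (get_codex_sequence input_seq)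

-- ===== LEMMAS AND PROOFS =====

theorem pv_stepA_eval (b c a d : Int) (fh' sh' res : List Int) (i : Int) :
    pvStepA (b :: c :: fh', a :: d :: sh', res) i = (fh', sh', res ++ [a] ++ [b] ++ [c] ++ [d]) := by
  have hpop : ∀ (y : Int) (ys : List Int), PySem.List.pop? (y :: ys) 0 = some (y, ys) := by
    intro y ys
    simp only [PySem.List.pop?, PySem.List.pyIdx?]
    norm_num
  simp [pvStepA, hpop]

-- A's loop characterised: k iterations read the quartets off the two halves by position.
theorem pv_loopA_spec (l : List Int) :
    ∀ (fh sh res : List Int), 2 * l.length ≤ fh.length → 2 * l.length ≤ sh.length →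
    (l.foldl pvStepA (fh, sh, res)).2.2
    = res ++ (List.range l.length).flatMap
        (fun i => [sh.getD (2 * i) 0, fh.getD (2 * i) 0, fh.getD (2 * i + 1) 0, sh.getD (2 * i + 1) 0]) := by
  induction l with
  | nil => simp
  | cons x t ih =>
    intro fh sh res hf hs
    match fh, sh with
    | [], _ => simp at hf
    | [_], _ => simp at hf; omega
    | _ :: _ :: _, [] => simp at hs
    | _ :: _ :: _, [_] => simp at hs; omega
    | b :: c :: fh', a :: d :: sh' =>
      have hf' : 2 * t.length ≤ fh'.length := by simp at hf; omega
      have hs' : 2 * t.length ≤ sh'.length := by simp at hs; omega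
      rw [List.foldl_cons, pv_stepA_eval, ih fh' sh' _ hf' hs']
      rw [List.length_cons, List.range_succ_eq_map, List.flatMap_cons, List.flatMap_map]
      have hfun : (fun i => [(a :: d :: sh').getD (2 * Nat.succ i) 0, (b :: c :: fh').getD (2 * Nat.succ i) 0,
            (b :: c :: fh').getD (2 * Nat.succ i + 1) 0, (a :: d :: sh').getD (2 * Nat.succ i + 1) 0])
          = (fun i => [sh'.getD (2 * i) 0, fh'.getD (2 * i) 0, fh'.getD (2 * i + 1) 0, sh'.getD (2 * i + 1) 0]) := by
        funext i
        have h1 : 2 * Nat.succ i = (2 * i) + 1 + 1 := by omega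
        rw [h1]
        simp
      simp only [hfun]
      simp [List.append_assoc]

theorem pv_getD_reverse (l : List Int) (j : Nat) (h : j < l.length) (d : Int) :
    l.reverse.getD j d = l.getD (l.length - 1 - j) d := by
  rw [List.getD_eq_getElem?_getD, List.getD_eq_getElem?_getD, List.getElem?_reverse h]

-- ===== VERDICT (by name: the statement is the Claim_ definition above) =====
theorem get_codex_sequence_spec : Claim_equal_get_codex_sequence := by
  intro L _
  unfold Spec_get_codex_sequence
  simp only [get_codex_sequence, get_codex_sequence_alt]
  have h2 : PySem.Int.floordiv (L.length : Int) 2 = ((L.length / 2 : Nat) : Int) := by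
    exact_mod_cast PySem.Int.floordiv_natCast L.length 2
  have h4 : PySem.Int.floordiv (L.length : Int) 4 = ((L.length / 4 : Nat) : Int) := by
    exact_mod_cast PySem.Int.floordiv_natCast L.length 4
  rw [h2, h4, PySem.List.slice_to L (by positivity), PySem.List.slice_from L (by positivity),
      PySem.List.pyRange_zero_natCast]
  simp only [Int.toNat_natCast]
  have hlen : (List.map (fun k : Nat => (k : Int)) (List.range (L.length / 4))).length = L.length / 4 := by
    simp
  rw [pv_loopA_spec _ _ _ _ (by rw [hlen, List.length_take]; omega)
        (by rw [hlen, List.length_reverse, List.length_drop]; omega)]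
  rw [hlen, List.flatMap_map, List.nil_append]
  apply List.flatMap_congr
  intro i hi
  have hik : i < L.length / 4 := List.mem_range.mp hi
  have hx2 : (2 * (i : Int)) = ((2 * i : Nat) : Int) := by push_cast; ring
  have hx1 : ((L.length : Int) - 1 - ((2 * i : Nat) : Int)) = ((L.length - 1 - 2 * i : Nat) : Int) := by
    push_cast; omega
  have hx3 : (((2 * i : Nat) : Int) + 1) = ((2 * i + 1 : Nat) : Int) := by push_cast; ring
  have hx4 : ((L.length : Int) - 2 - ((2 * i : Nat) : Int)) = ((L.length - 2 - 2 * i : Nat) : Int) := by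
    push_cast; omega
  simp only [List.map_cons, List.map_nil, hx2, hx1, hx3, hx4,
    PySem.List.pyGet?_natCast]
  have hrev1 : (List.drop (L.length / 2) L).reverse.getD (2 * i) 0 = L.getD (L.length - 1 - 2 * i) 0 := by
    have hlt : 2 * i < (List.drop (L.length / 2) L).length := by rw [List.length_drop]; omega
    rw [pv_getD_reverse _ _ hlt, List.length_drop,
        List.getD_eq_getElem?_getD, List.getD_eq_getElem?_getD, List.getElem?_drop]
    congr 2
    omega
  have hrev2 : (List.drop (L.length / 2) L).reverse.getD (2 * i + 1) 0 = L.getD (L.length - 2 - 2 * i) 0 := by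
    have hlt : 2 * i + 1 < (List.drop (L.length / 2) L).length := by rw [List.length_drop]; omega
    rw [pv_getD_reverse _ _ hlt, List.length_drop,
        List.getD_eq_getElem?_getD, List.getD_eq_getElem?_getD, List.getElem?_drop]
    congr 2
    omega
  have htake : ∀ j : Nat, j < L.length / 2 → (List.take (L.length / 2) L).getD j 0 = L.getD j 0 := by
    intro j hj
    rw [List.getD_eq_getElem?_getD, List.getD_eq_getElem?_getD, List.getElem?_take_of_lt hj]
  rw [hrev1, hrev2, htake (2 * i) (by omega), htake (2 * i + 1) (by omega)]
  simp [List.getD_eq_getElem?_getD]
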